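-- pv_equiv track=rewrite | github.com/zahediadib/battle-for-rokugan | backend/game_engine.py | check_single_territory
-- ===== SOURCE A (Python) =====
-- def check_single_territory(game, prov_ids):
--     """Check if one player controls all given provinces."""
--     if not prov_ids:
--         return None
--     controllers = set()
--     for pid in prov_ids:
--         prov = game["provinces"].get(pid)
--         if not prov or prov["controlled_by"] is None:
--             return None
--         controllers.add(prov["controlled_by"])
--     if len(controllers) == 1:
--         return controllers.pop()
--     return None
-- ===== SOURCE B (Python) =====
-- def check_single_territory(game, prov_ids):
--     """Check if one player controls all given provinces."""
--     if not prov_ids: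
--         return None
--     provs = game["provinces"]
--
--     def owner(pid):
--         prov = provs.get(pid)
--         return None if not prov else prov["controlled_by"]
--
--     c = owner(prov_ids[0])
--     if c is None:
--         return None
--     return c if all(owner(pid) == c for pid in prov_ids[1:]) else None
-- ===== Notes on version B (the rewrite author's own statement) =====
-- stated objective: simpler
-- what changed: B drops A's accumulated controller set and its final size check entirely: it takes the first province's owner as the sole candidate and verifies with a short-circuiting all() that every remaining province has that same owner, so no collection is ever built.
import Mathlib
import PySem

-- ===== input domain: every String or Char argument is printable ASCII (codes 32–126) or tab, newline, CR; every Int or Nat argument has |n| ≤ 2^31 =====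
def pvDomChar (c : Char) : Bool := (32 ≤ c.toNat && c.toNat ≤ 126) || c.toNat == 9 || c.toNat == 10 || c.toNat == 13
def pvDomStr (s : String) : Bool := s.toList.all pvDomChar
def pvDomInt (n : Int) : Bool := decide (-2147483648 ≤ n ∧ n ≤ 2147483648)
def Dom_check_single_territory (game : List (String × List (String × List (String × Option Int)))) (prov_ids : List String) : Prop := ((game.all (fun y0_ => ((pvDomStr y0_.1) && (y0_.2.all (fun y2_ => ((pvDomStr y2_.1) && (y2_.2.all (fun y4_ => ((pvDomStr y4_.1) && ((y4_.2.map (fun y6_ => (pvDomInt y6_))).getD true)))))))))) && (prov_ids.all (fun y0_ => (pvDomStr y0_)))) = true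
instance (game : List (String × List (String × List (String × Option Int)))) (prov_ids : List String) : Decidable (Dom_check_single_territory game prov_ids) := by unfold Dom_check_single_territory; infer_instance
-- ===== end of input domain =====

-- B drops A's accumulated controller set and final size check: it takes the first province's owner
-- as the sole candidate and verifies every remaining province has that same owner (objective: simpler).

-- ===== PORT A =====
-- the loop 'for pid in prov_ids: …' with its early returns; 'controllers' is the Python set
def csA_loop (provs : List (String × List (String × Option Int))) :
    List String → PySem.Set Int → Option (PySem.Set Int)
  | [], controllers => some controllers
  | pid :: rest, controllers =>
    match PySem.Dict.get? (PySem.Dict.mk provs) pid with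
    | none => none                        -- prov is None → 'not prov'
    | some prov =>
      if prov = [] then none              -- empty dict → 'not prov'
      else
        match PySem.Dict.get? (PySem.Dict.mk prov) "controlled_by" with
        | none => none                    -- Python KeyError here; excluded by Pre_
        | some none => none               -- prov["controlled_by"] is None
        | some (some c) => csA_loop provs rest (PySem.Set.add controllers c)

def check_single_territory (game : List (String × List (String × List (String × Option Int)))) (prov_ids : List String) : Option Int :=
  if prov_ids = [] then none
  else
    match csA_loop ((PySem.Dict.get? (PySem.Dict.mk game) "provinces").getD []) prov_ids PySem.Set.empty with
    | none => none
    | some controllers =>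
      -- 'controllers.pop()' on a singleton set is its unique element
      if controllers.length = 1 then controllers.head? else none

-- ===== PORT B =====
-- the helper 'owner(pid)': missing or empty province dict → None, else prov["controlled_by"]
-- (the KeyError of a non-empty dict lacking "controlled_by" is modelled as none; excluded by Pre_)
def csB_owner (provs : List (String × List (String × Option Int))) (pid : String) : Option Int :=
  match PySem.Dict.get? (PySem.Dict.mk provs) pid with
  | none => none
  | some prov =>
    if prov = [] then none
    else (PySem.Dict.get? (PySem.Dict.mk prov) "controlled_by").getD none

def check_single_territory_alt (game : List (String × List (String × List (String × Option Int)))) (prov_ids : List String) : Option Int :=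
  match prov_ids with
  | [] => none
  | p0 :: rest =>
    let provs := (PySem.Dict.get? (PySem.Dict.mk game) "provinces").getD []
    match csB_owner provs p0 with
    | none => none                        -- 'if c is None: return None'
    | some c =>
      -- 'c if all(owner(pid) == c for pid in prov_ids[1:]) else None'
      if rest.all (fun pid => csB_owner provs pid == some c) then some c else none

-- ===== PRECONDITION & SPEC =====
-- spec-side helpers (lookup of a province dict and of its owner, with missing → {} / None)
def pvProvsOf (game : List (String × List (String × List (String × Option Int)))) : List (String × List (String × Option Int)) :=
  (PySem.Dict.get? (PySem.Dict.mk game) "provinces").getD []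
def pvProv (provs : List (String × List (String × Option Int))) (pid : String) : List (String × Option Int) :=
  (PySem.Dict.get? (PySem.Dict.mk provs) pid).getD []
-- the owner a province's dict yields for pid, with missing/empty → none
def pvOwner (provs : List (String × List (String × Option Int))) (pid : String) : Option Int :=
  PySem.Dict.getD (PySem.Dict.mk (pvProv provs pid)) "controlled_by" none

-- "the loop never reaches a non-empty province dict lacking a 'controlled_by' key": at any index i
-- holding such a province, some earlier index already stops the loop with a None owner
def pvNoReachedBad (game : List (String × List (String × List (String × Option Int)))) (prov_ids : List String) : Prop :=
  ∀ i, (hi : i < prov_ids.length) →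
    (pvProv (pvProvsOf game) prov_ids[i] ≠ [] ∧
     PySem.Dict.get? (PySem.Dict.mk (pvProv (pvProvsOf game) prov_ids[i])) "controlled_by" = none) →
    ∃ j, ∃ (hj : j < i), pvOwner (pvProvsOf game) (prov_ids[j]'(hj.trans hi)) = none
-- Pre_ excludes exactly the inputs where A raises KeyError: a game without a "provinces" key (when
-- prov_ids is non-empty; an empty prov_ids returns before that lookup), and a prov_ids whose loop
-- reaches a non-empty province dict lacking a "controlled_by" key. Pre_ is needed only for the
-- faithfulness of the ports to their Pythons; the port-level equality below holds on all of Dom.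
def Pre_check_single_territory (game : List (String × List (String × List (String × Option Int)))) (prov_ids : List String) : Prop :=
  (prov_ids = [] ∨ (PySem.Dict.get? (PySem.Dict.mk game) "provinces").isSome = true) ∧
  pvNoReachedBad game prov_ids
instance (game : List (String × List (String × List (String × Option Int)))) (prov_ids : List String) : Decidable (Pre_check_single_territory game prov_ids) := by unfold Pre_check_single_territory pvNoReachedBad; infer_instance

def pvWitness_check_single_territory : (List (String × List (String × List (String × Option Int)))) × List String :=
  ([("provinces", [("p", [("controlled_by", some 1)])])], ["p"])

def Spec_check_single_territory (game : List (String × List (String × List (String × Option Int)))) (prov_ids : List String) (out : Option Int) : Prop := out = check_single_territory_alt game prov_ids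
instance (game : List (String × List (String × List (String × Option Int)))) (prov_ids : List String) (out : Option Int) : Decidable (Spec_check_single_territory game prov_ids out) := by unfold Spec_check_single_territory; infer_instance

-- ===== CLAIM (what is proved, stated in full; the proofs are below) =====
def Claim_equal_check_single_territory : Prop := ∀ (game : List (String × List (String × List (String × Option Int)))) (prov_ids : List String), Dom_check_single_territory game prov_ids → Pre_check_single_territory game prov_ids → Spec_check_single_territory game prov_ids (check_single_territory game prov_ids)

-- ===== LEMMAS AND PROOFS =====

lemma csB_owner_eq_pvOwner (provs : List (String × List (String × Option Int))) (pid : String) :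
    csB_owner provs pid = pvOwner provs pid := by
  unfold csB_owner pvOwner pvProv
  cases hg : PySem.Dict.get? (PySem.Dict.mk provs) pid with
  | none => simp [PySem.Dict.getD, PySem.Dict.get?]
  | some prov =>
    by_cases hpe : prov = []
    · simp [hpe, PySem.Dict.getD, PySem.Dict.get?]
    · simp [hpe, PySem.Dict.getD_eq_get?_getD]

lemma pvOwner_none_of_prov_nil {provs : List (String × List (String × Option Int))} {pid : String}
    (h : pvProv provs pid = []) : pvOwner provs pid = none := by
  simp [pvOwner, h, PySem.Dict.getD, PySem.Dict.get?]

-- at a pid whose owner comes out as some c, the loop takes exactly the 'add' branch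
lemma csA_loop_cons_some (provs : List (String × List (String × Option Int)))
    (pid : String) (rest : List String) (S : PySem.Set Int) (c : Int)
    (h : pvOwner provs pid = some c) :
    csA_loop provs (pid :: rest) S = csA_loop provs rest (PySem.Set.add S c) := by
  cases hg : PySem.Dict.get? (PySem.Dict.mk provs) pid with
  | none =>
    rw [pvOwner_none_of_prov_nil (by simp [pvProv, hg])] at h; exact absurd h (by simp)
  | some prov =>
    by_cases hpe : prov = []
    · rw [pvOwner_none_of_prov_nil (by simp [pvProv, hg, hpe])] at h; exact absurd h (by simp)
    · have hp : pvProv provs pid = prov := by simp [pvProv, hg]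
      have h' : (PySem.Dict.get? (PySem.Dict.mk prov) "controlled_by").getD none = some c := by
        rw [← hp]; simpa [pvOwner, PySem.Dict.getD_eq_get?_getD, hp] using h
      cases hv : PySem.Dict.get? (PySem.Dict.mk prov) "controlled_by" with
      | none => rw [hv] at h'; exact absurd h' (by simp)
      | some v =>
        rw [hv] at h'; simp at h'
        simp [csA_loop, hg, hpe, hv, h']

-- at a pid whose owner comes out as None, the loop returns None (any of the early exits)
lemma csA_loop_cons_none (provs : List (String × List (String × Option Int)))
    (pid : String) (rest : List String) (S : PySem.Set Int)
    (h : pvOwner provs pid = none) :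
    csA_loop provs (pid :: rest) S = none := by
  cases hg : PySem.Dict.get? (PySem.Dict.mk provs) pid with
  | none => simp [csA_loop, hg]
  | some prov =>
    by_cases hpe : prov = []
    · simp [csA_loop, hg, hpe]
    · have hp : pvProv provs pid = prov := by simp [pvProv, hg]
      have h' : (PySem.Dict.get? (PySem.Dict.mk prov) "controlled_by").getD none = none := by
        rw [← hp]; simpa [pvOwner, PySem.Dict.getD_eq_get?_getD, hp] using h
      cases hv : PySem.Dict.get? (PySem.Dict.mk prov) "controlled_by" with
      | none => simp [csA_loop, hg, hpe, hv]
      | some v =>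
        rw [hv] at h'; simp at h'
        simp [csA_loop, hg, hpe, hv, h']

lemma csA_loop_none (provs : List (String × List (String × Option Int))) :
    ∀ (pids : List String) (S : PySem.Set Int), none ∈ pids.map (pvOwner provs) →
    csA_loop provs pids S = none := by
  intro pids
  induction pids with
  | nil => intro S h; simp at h
  | cons pid rest ih =>
    intro S h
    cases ho : pvOwner provs pid with
    | none => exact csA_loop_cons_none provs pid rest S ho
    | some c =>
      rw [csA_loop_cons_some provs pid rest S c ho]
      refine ih _ ?_
      simpa [ho] using h

-- when no owner is None, the loop builds exactly set(owners) (after stripping 'some')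
lemma csA_loop_char (provs : List (String × List (String × Option Int))) :
    ∀ (pids : List String) (S : PySem.Set Int), none ∉ pids.map (pvOwner provs) →
    csA_loop provs pids S =
      some (List.foldl (fun s o => PySem.Set.add s (o.getD 0)) S (pids.map (pvOwner provs))) := by
  intro pids
  induction pids with
  | nil => intro S _; simp [csA_loop]
  | cons pid rest ih =>
    intro S h
    cases ho : pvOwner provs pid with
    | none => exact absurd (by simp [ho]) h
    | some c =>
      rw [csA_loop_cons_some provs pid rest S c ho, ih _ (by simpa [ho] using h)]
      simp [ho]

lemma mem_map_iget {T : List (Option Int)} (hT : none ∉ T) (c : Int) :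
    c ∈ T.map (fun o => o.getD 0) ↔ some c ∈ T := by
  simp only [List.mem_map]
  constructor
  · rintro ⟨o, ho, rfl⟩
    cases o with
    | none => exact absurd ho hT
    | some x => simpa using ho
  · intro h; exact ⟨some c, h, rfl⟩

lemma foldl_add_iget (os : List (Option Int)) :
    ∀ (T : PySem.Set (Option Int)), none ∉ os → none ∉ T →
    List.foldl (fun s o => PySem.Set.add s (o.getD 0)) (T.map (fun o => o.getD 0)) os
      = (List.foldl PySem.Set.add T os).map (fun o => o.getD 0) := by
  induction os with
  | nil => intro T _ _; rfl
  | cons o os ih =>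
    intro T hos hT
    have hone : o ≠ none := fun h => hos (h ▸ List.mem_cons_self ..)
    obtain ⟨c, rfl⟩ := Option.ne_none_iff_exists'.mp hone
    have hos' : none ∉ os := fun h => hos (List.mem_cons_of_mem _ h)
    have hstep : PySem.Set.add (T.map (fun o => o.getD 0)) c
        = (PySem.Set.add T (some c)).map (fun o => o.getD 0) := by
      rw [PySem.Set.add_eq_ite, PySem.Set.add_eq_ite]
      by_cases hm : some c ∈ T
      · rw [if_pos ((mem_map_iget hT c).mpr hm), if_pos hm]
      · rw [if_neg (fun hc => hm ((mem_map_iget hT c).mp hc)), if_neg hm]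
        simp
    have hT' : none ∉ PySem.Set.add T (some c) := by
      intro hc
      rcases (PySem.Set.mem_add _ _ _).mp hc with h | h
      · exact hT h
      · simp at h
    simp only [List.foldl_cons, Option.getD_some] at *
    rw [hstep, ih _ hos' hT']

-- a nodup list whose elements all equal o, containing o, is [o]
lemma nodup_all_eq {α : Type} {l : List α} {o : α}
    (hn : l.Nodup) (ho : o ∈ l) (hall : ∀ x ∈ l, x = o) : l = [o] := by
  cases l with
  | nil => exact absurd ho (by simp)
  | cons a t =>
    have ha : a = o := hall a (by simp)
    subst ha
    have ht : t = [] := by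
      cases t with
      | nil => rfl
      | cons b t' =>
        have hb : b = a := hall b (by simp)
        exact absurd (hb ▸ List.mem_cons_self ..) (List.nodup_cons.mp hn).1
    rw [ht]

-- set(o :: os) is a singleton iff every element of os equals o (and then it is [o])
lemma ofList_cons_len_one_iff (o : Option Int) (os : List (Option Int)) :
    (PySem.Set.ofList (o :: os)).length = 1 ↔ ∀ x ∈ os, x = o := by
  constructor
  · intro h1
    obtain ⟨a, ha⟩ := List.length_eq_one_iff.mp h1
    have hoa : o = a := by
      have := (PySem.Set.mem_ofList (xs := o :: os) (y := o)).mpr (by simp)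
      rw [ha] at this; simpa using this
    intro x hx
    have := (PySem.Set.mem_ofList (xs := o :: os) (y := x)).mpr (by simp [hx])
    rw [ha] at this; simp at this
    rw [this, ← hoa]
  · intro hall
    have heq : PySem.Set.ofList (o :: os) = [o] := by
      refine nodup_all_eq (PySem.Set.nodup_ofList _) ?_ ?_
      · exact (PySem.Set.mem_ofList ..).mpr (by simp)
      · intro x hx
        rcases List.mem_cons.mp ((PySem.Set.mem_ofList ..).mp hx) with h | h
        · exact h
        · exact hall x h
    rw [heq]; rfl

-- ===== VERDICT (by name: the statement is the Claim_ definition above) =====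
theorem check_single_territory_spec : Claim_equal_check_single_territory := by
  intro game prov_ids _ _
  unfold Spec_check_single_territory
  cases prov_ids with
  | nil => rfl
  | cons p0 ps =>
    have hA : check_single_territory game (p0 :: ps)
        = match csA_loop (pvProvsOf game) (p0 :: ps) PySem.Set.empty with
          | none => none
          | some controllers => if controllers.length = 1 then controllers.head? else none := by
      simp [check_single_territory, pvProvsOf]
    have hB : check_single_territory_alt game (p0 :: ps)
        = match pvOwner (pvProvsOf game) p0 with
          | none => none
          | some c => if ps.all (fun pid => pvOwner (pvProvsOf game) pid == some c)
              then some c else none := by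
      simp only [check_single_territory_alt, csB_owner_eq_pvOwner, pvProvsOf]
      rfl
    rw [hA, hB]
    cases h0 : pvOwner (pvProvsOf game) p0 with
    | none =>
      rw [csA_loop_cons_none _ _ _ _ h0]
    | some c =>
      by_cases hn : none ∈ ps.map (pvOwner (pvProvsOf game))
      · have : none ∈ (p0 :: ps).map (pvOwner (pvProvsOf game)) := by simp [hn]
        rw [csA_loop_none _ _ _ this]
        have hfail : ps.all (fun pid => pvOwner (pvProvsOf game) pid == some c) = false := by
          obtain ⟨pid, hpid, hnone⟩ := List.mem_map.mp hn
          refine List.all_eq_false.mpr ⟨pid, hpid, ?_⟩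
          simp [hnone]
        simp [hfail]
      · have hn' : none ∉ (p0 :: ps).map (pvOwner (pvProvsOf game)) := by
          simp [h0, hn]
        rw [csA_loop_char _ _ _ hn']
        set owners := (p0 :: ps).map (pvOwner (pvProvsOf game)) with howners
        have hfold := foldl_add_iget owners PySem.Set.empty hn' (by simp [PySem.Set.empty])
        have hctr : List.foldl (fun s o => PySem.Set.add s (o.getD 0)) PySem.Set.empty owners
            = (PySem.Set.ofList owners).map (fun o => o.getD 0) := by
          rw [show (PySem.Set.empty : PySem.Set (Option Int)).map (fun o => o.getD 0)
                = (PySem.Set.empty : PySem.Set Int) from rfl] at hfold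
          rw [hfold, PySem.Set.ofList_eq_foldl]
          rfl
        rw [hctr]
        show (if ((PySem.Set.ofList owners).map (fun o => o.getD 0)).length = 1
          then ((PySem.Set.ofList owners).map (fun o => o.getD 0)).head? else none) = _
        have hlen : ((PySem.Set.ofList owners).map (fun o => o.getD 0)).length
            = (PySem.Set.ofList owners).length := List.length_map ..
        have hiff := ofList_cons_len_one_iff (some c) (ps.map (pvOwner (pvProvsOf game)))
        have howners' : owners = some c :: ps.map (pvOwner (pvProvsOf game)) := by
          rw [howners]; simp [h0]
        by_cases hall : ∀ x ∈ ps.map (pvOwner (pvProvsOf game)), x = some c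
        · have h1 : (PySem.Set.ofList owners).length = 1 := by
            rw [howners']; exact hiff.mpr hall
          rw [if_pos (hlen.trans h1)]
          have hset : PySem.Set.ofList owners = [some c] := by
            rw [howners']
            refine nodup_all_eq (PySem.Set.nodup_ofList _) ((PySem.Set.mem_ofList ..).mpr (by simp)) ?_
            intro x hx
            rcases List.mem_cons.mp ((PySem.Set.mem_ofList ..).mp hx) with h | h
            · exact h
            · exact hall x h
          rw [hset]
          have hallb : ps.all (fun pid => pvOwner (pvProvsOf game) pid == some c) = true := by
            refine List.all_eq_true.mpr fun pid hpid => ?_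
            have := hall (pvOwner (pvProvsOf game) pid) (List.mem_map.mpr ⟨pid, hpid, rfl⟩)
            simp [this]
          simp [hallb]
        · have h1 : (PySem.Set.ofList owners).length ≠ 1 := by
            rw [howners']; exact fun h => hall (hiff.mp h)
          rw [if_neg (fun h => h1 (hlen ▸ h))]
          have hfail : ps.all (fun pid => pvOwner (pvProvsOf game) pid == some c) = false := by
            rw [List.all_eq_false]
            rw [not_forall] at hall
            obtain ⟨x, hx⟩ := hall
            rw [Classical.not_imp] at hx
            obtain ⟨hx, hxne⟩ := hx
            obtain ⟨pid, hpid, rfl⟩ := List.mem_map.mp hx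
            exact ⟨pid, hpid, by simpa using hxne⟩
          simp [hfail]
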